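-- pv_equiv track=rewrite | github.com/dheeraj0000/2025-training | Day-15/1st.py | last_served_meatball_index
-- ===== SOURCE A (Python) =====
-- from collections import deque
--
-- def last_served_meatball_index(N, D, weights):
--     queue = deque((weight, i + 1) for i, weight in enumerate(weights))
--
--     last_served_index = -1
--
--     while queue:
--         weight, index = queue.popleft()
--         if weight <= D:
--
--             last_served_index = index
--         else:
--
--             queue.append((weight - D, index))
--
--     return last_served_index
-- ===== SOURCE B (Python) =====
-- def last_served_meatball_index(N, D, weights):
--     best = 0
--     idx = -1
--     for i, w in enumerate(weights, 1):
--         r = 1 if w <= D else -(-w // D)  # number of the round in which item i is served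
--         if r >= best:
--             best = r
--             idx = i
--     return idx
-- ===== Notes on version B (the rewrite author's own statement) =====
-- stated objective: alternative
-- what changed: B replaces A's round-robin deque simulation (re-queueing each item once per round) by a single scan computing each item's serving round ceil(w/D) in closed form and keeping the max round with the latest index on ties.
import Mathlib
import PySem

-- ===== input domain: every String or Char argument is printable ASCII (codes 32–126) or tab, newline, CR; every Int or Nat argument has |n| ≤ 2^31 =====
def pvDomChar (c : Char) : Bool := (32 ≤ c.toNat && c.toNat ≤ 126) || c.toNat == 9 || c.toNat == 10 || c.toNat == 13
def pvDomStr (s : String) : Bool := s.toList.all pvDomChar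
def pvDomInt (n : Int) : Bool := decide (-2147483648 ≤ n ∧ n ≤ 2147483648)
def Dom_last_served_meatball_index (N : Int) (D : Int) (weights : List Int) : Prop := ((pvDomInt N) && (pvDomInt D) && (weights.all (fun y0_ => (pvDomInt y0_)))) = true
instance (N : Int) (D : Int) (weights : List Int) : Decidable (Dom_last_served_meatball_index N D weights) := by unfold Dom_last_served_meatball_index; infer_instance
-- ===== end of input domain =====

-- B replaces A's round-robin queue simulation by a single pass computing each item's
-- serving round ceil(w/D) in closed form (a different algorithm; a timing run did
-- not confirm a speed label, so none is claimed).

-- ===== PORT A =====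
-- A's while-loop over the deque; the Nat fuel only makes the recursion total — under
-- Pre_ (where A terminates) it is never exhausted.
def pvALoop (D : Int) : Nat → List (Int × Int) → Int → Int
  | _, [], last => last
  | 0, _ :: _, last => last
  | fuel + 1, (w, i) :: rest, last =>
      if w ≤ D then pvALoop D fuel rest i
      else pvALoop D fuel (rest ++ [(w - D, i)]) last

def last_served_meatball_index (N : Int) (D : Int) (weights : List Int) : Int :=
  pvALoop D (weights.length + (weights.map (fun w => w.toNat)).sum)
    ((PySem.List.enumerate weights).map (fun p => (p.2, p.1 + 1))) (-1)

-- ===== PORT B =====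
-- serving round of an item of weight w: 1 if w ≤ D, else ceil(w/D) = -(-w // D)
def pvRounds (D : Int) (w : Int) : Int :=
  if w ≤ D then 1 else -(PySem.Int.floordiv (-w) D)

def pvBStep (D : Int) (st : Int × Int) (p : Int × Int) : Int × Int :=
  if pvRounds D p.2 ≥ st.1 then (pvRounds D p.2, p.1) else st

def last_served_meatball_index_alt (N : Int) (D : Int) (weights : List Int) : Int :=
  ((PySem.List.enumerate weights 1).foldl (pvBStep D) (0, -1)).2

-- ===== PRECONDITION & SPEC =====
-- Pre_ excludes exactly the inputs where A never returns: with D ≤ 0 and some weight > D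
-- the deque entry never shrinks below D and A's while-loop runs forever.
def Pre_last_served_meatball_index (N : Int) (D : Int) (weights : List Int) : Prop :=
  0 < D ∨ ∀ w ∈ weights, w ≤ D
instance (N : Int) (D : Int) (weights : List Int) : Decidable (Pre_last_served_meatball_index N D weights) := by unfold Pre_last_served_meatball_index; infer_instance

def pvWitness_last_served_meatball_index : Int × Int × List Int := (3, 2, [5, 1, 4])

def Spec_last_served_meatball_index (N : Int) (D : Int) (weights : List Int) (out : Int) : Prop := out = last_served_meatball_index_alt N D weights
instance (N : Int) (D : Int) (weights : List Int) (out : Int) : Decidable (Spec_last_served_meatball_index N D weights out) := by unfold Spec_last_served_meatball_index; infer_instance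

-- ===== CLAIM =====
def Claim_equal_last_served_meatball_index : Prop := ∀ (N : Int) (D : Int) (weights : List Int), Dom_last_served_meatball_index N D weights → Pre_last_served_meatball_index N D weights → Spec_last_served_meatball_index N D weights (last_served_meatball_index N D weights)

-- ===== LEMMAS AND PROOFS =====

-- fold over the queue shape (weight, index), same step as B's
def pvQStep (D : Int) (st : Int × Int) (p : Int × Int) : Int × Int :=
  if pvRounds D p.1 ≥ st.1 then (pvRounds D p.1, p.2) else st

def pvFoldQ (D : Int) (q : List (Int × Int)) (st : Int × Int) : Int × Int :=
  q.foldl (pvQStep D) st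

def pvSumR (D : Int) (q : List (Int × Int)) : Int :=
  (q.map (fun p => pvRounds D p.1)).sum

lemma pvRounds_ge_one {D w : Int} (h : 1 ≤ D ∨ w ≤ D) : 1 ≤ pvRounds D w := by
  unfold pvRounds
  split_ifs with hw
  · omega
  · have hD : 0 < D := by omega
    have : PySem.Int.floordiv (-w) D < 0 := by
      rw [PySem.Int.floordiv_lt_iff_lt_mul hD]; omega
    omega

lemma pvRounds_sub {D w : Int} (hD : 1 ≤ D) (hw : D < w) :
    pvRounds D (w - D) = pvRounds D w - 1 := by
  have hD0 : (0:Int) < D := by omega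
  have hne : ¬ w ≤ D := by omega
  by_cases h2 : w - D ≤ D
  · have hr2 : -(PySem.Int.floordiv (-w) D) = 2 := by
      rw [PySem.Int.neg_floordiv_neg_eq_iff_of_pos hD0]
      constructor <;> nlinarith
    simp only [pvRounds, if_pos h2, if_neg hne, hr2]
    omega
  · have hr := (PySem.Int.neg_floordiv_neg_eq_iff_of_pos hD0
      (q := -(PySem.Int.floordiv (-w) D))).mp rfl
    have hr' : -(PySem.Int.floordiv (-(w - D)) D) = -(PySem.Int.floordiv (-w) D) - 1 := by
      rw [PySem.Int.neg_floordiv_neg_eq_iff_of_pos hD0]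
      constructor <;> nlinarith [hr.1, hr.2]
    simp only [pvRounds, if_neg h2, if_neg hne, hr']

lemma pvRounds_le {D w : Int} (h : 1 ≤ D ∨ w ≤ D) : pvRounds D w ≤ 1 + max 0 w := by
  unfold pvRounds
  split_ifs with hw
  · omega
  · have hD : 0 < D := by omega
    have hlow : -w ≤ PySem.Int.floordiv (-w) D := by
      rw [PySem.Int.le_floordiv_iff_mul_le hD]; nlinarith
    omega

lemma pvQStep_pair (D b j : Int) (p : Int × Int) :
    pvQStep D (b, j) p = if pvRounds D p.1 ≥ b then (pvRounds D p.1, p.2) else (b, j) := rfl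

lemma pvFoldQ_fst_ge (D : Int) (q : List (Int × Int)) (st : Int × Int) :
    st.1 ≤ (pvFoldQ D q st).1 := by
  induction q generalizing st with
  | nil => simp [pvFoldQ]
  | cons p t ih =>
      simp only [pvFoldQ, List.foldl_cons]
      by_cases h : pvRounds D p.1 ≥ st.1
      · exact le_trans h (by simpa [pvFoldQ, pvQStep, h] using ih (pvRounds D p.1, p.2))
      · simpa [pvFoldQ, pvQStep, h] using ih st

lemma pvFoldQ_G (D : Int) (t : List (Int × Int)) :
    ∀ (r j b0 j0 : Int), 1 ≤ r → b0 ≤ r - 1 →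
      (pvFoldQ D t (r, j)).2 =
        (if r - 1 ≥ (pvFoldQ D t (b0, j0)).1 then j else (pvFoldQ D t (b0, j0)).2) := by
  induction t with
  | nil =>
      intro r j b0 j0 h1 h2
      simp only [pvFoldQ, List.foldl_nil]
      rw [if_pos (by omega)]
  | cons p t ih =>
      intro r j b0 j0 h1 h2
      simp only [pvFoldQ, List.foldl_cons] at *
      by_cases hvr : pvRounds D p.1 ≥ r
      · have hvb : pvRounds D p.1 ≥ b0 := by omega
        simp only [pvQStep, if_pos hvr, if_pos hvb]
        have hge : pvRounds D p.1 ≤ (List.foldl (pvQStep D) (pvRounds D p.1, p.2) t).1 :=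
          pvFoldQ_fst_ge D t (pvRounds D p.1, p.2)
        rw [if_neg (by omega)]
      · simp only [pvQStep, if_neg hvr]
        by_cases hvb : pvRounds D p.1 ≥ b0
        · rw [if_pos hvb]
          exact ih r j (pvRounds D p.1) p.2 h1 (by omega)
        · rw [if_neg hvb]
          exact ih r j b0 j0 h1 h2

lemma pvLen_le_sumR (D : Int) (q : List (Int × Int))
    (h : 1 ≤ D ∨ ∀ p ∈ q, p.1 ≤ D) : (q.length : Int) ≤ pvSumR D q := by
  induction q with
  | nil => simp [pvSumR]
  | cons p t ih =>
      have hp : 1 ≤ pvRounds D p.1 :=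
        pvRounds_ge_one (h.imp id (fun hh => hh p (List.mem_cons_self)))
      have ht := ih (h.imp id (fun hh q hq => hh q (List.mem_cons_of_mem p hq)))
      simp only [pvSumR, List.map_cons, List.sum_cons, List.length_cons] at *
      push_cast
      omega

lemma pvMain (D : Int) :
    ∀ (fuel : Nat) (q : List (Int × Int)) (last : Int),
      (1 ≤ D ∨ ∀ p ∈ q, p.1 ≤ D) → pvSumR D q ≤ (fuel : Int) →
      pvALoop D fuel q last =
        (if q = [] then last else (pvFoldQ D q (0, -1)).2) := by
  intro fuel
  induction fuel with
  | zero =>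
      intro q last h hs
      have hlen := pvLen_le_sumR D q h
      have : q = [] := by
        cases q with
        | nil => rfl
        | cons p t => simp at hlen; omega
      subst this
      simp [pvALoop]
  | succ f ih =>
      intro q last h hs
      cases q with
      | nil => simp [pvALoop]
      | cons p t =>
          obtain ⟨w, i⟩ := p
          have hw1 : 1 ≤ pvRounds D w :=
            pvRounds_ge_one (h.imp id (fun hh => hh (w, i) (List.mem_cons_self)))
          have hsum : pvRounds D w + (t.map (fun p => pvRounds D p.1)).sum ≤ (f : Int) + 1 := by
            simp only [pvSumR, List.map_cons, List.sum_cons] at hs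
            push_cast at hs ⊢; omega
          by_cases hwD : w ≤ D
          · -- served this round
            have hr1 : pvRounds D w = 1 := by simp [pvRounds, hwD]
            have ht : 1 ≤ D ∨ ∀ p ∈ t, p.1 ≤ D :=
              h.imp id (fun hh q hq => hh q (List.mem_cons_of_mem _ hq))
            have hA : pvALoop D (f + 1) ((w, i) :: t) last = pvALoop D f t i := by
              simp [pvALoop, hwD]
            rw [hA, ih t i ht (by simp only [pvSumR]; omega)]
            rw [if_neg (List.cons_ne_nil _ _)]
            cases t with
            | nil =>
                rw [if_pos rfl]
                simp only [pvFoldQ, List.foldl_cons, List.foldl_nil, pvQStep_pair]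
                rw [if_pos (by omega : pvRounds D w ≥ (0:Int))]
            | cons q' t' =>
                rw [if_neg (List.cons_ne_nil _ _)]
                have hq' : 1 ≤ pvRounds D q'.1 :=
                  pvRounds_ge_one (ht.imp id (fun hh => hh q' (List.mem_cons_self)))
                simp only [pvFoldQ, List.foldl_cons, pvQStep_pair]
                rw [if_pos (by omega : pvRounds D w ≥ (0:Int)), hr1, pvQStep_pair,
                    if_pos (by omega : pvRounds D q'.1 ≥ (1:Int)),
                    if_pos (by omega : pvRounds D q'.1 ≥ (0:Int))]
          · -- goes to the back with weight w - D
            have hD : 1 ≤ D := by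
              rcases h with h | h
              · exact h
              · exact absurd (h (w, i) (List.mem_cons_self)) hwD
            have hrsub : pvRounds D (w - D) = pvRounds D w - 1 :=
              pvRounds_sub hD (by omega)
            have hsum' : pvSumR D (t ++ [(w - D, i)]) ≤ (f : Int) := by
              simp only [pvSumR, List.map_append, List.sum_append, List.map_cons,
                List.map_nil, List.sum_cons, List.sum_nil]
              omega
            have hA : pvALoop D (f + 1) ((w, i) :: t) last =
                pvALoop D f (t ++ [(w - D, i)]) last := by
              simp [pvALoop, hwD]
            rw [hA, ih (t ++ [(w - D, i)]) last (Or.inl hD) hsum']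
            rw [if_neg (by simp), if_neg (by simp)]
            have hlhs : (pvFoldQ D ((w, i) :: t) (0, -1)).2 = (pvFoldQ D t (pvRounds D w, i)).2 := by
              simp only [pvFoldQ, List.foldl_cons, pvQStep_pair]
              rw [if_pos (by omega : pvRounds D w ≥ (0:Int))]
            rw [hlhs, pvFoldQ_G D t (pvRounds D w) i 0 (-1) hw1 (by omega)]
            have hrhs : pvFoldQ D (t ++ [(w - D, i)]) (0, -1) =
                pvQStep D (pvFoldQ D t (0, -1)) (w - D, i) := by
              simp [pvFoldQ, List.foldl_append]
            rw [hrhs]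
            rcases hfq : pvFoldQ D t (0, -1) with ⟨b1, j1⟩
            simp only [pvQStep_pair, hrsub]
            split_ifs <;> rfl

lemma pvEnumShift (ws : List Int) : ∀ (s : Int),
    PySem.List.enumerate ws (s + 1) = (PySem.List.enumerate ws s).map (fun p => (p.1 + 1, p.2)) := by
  induction ws with
  | nil => intro s; simp [PySem.List.enumerate_nil]
  | cons a t ih =>
      intro s
      rw [PySem.List.enumerate_cons, PySem.List.enumerate_cons, List.map_cons, ih (s + 1)]

theorem last_served_meatball_index_spec : Claim_equal_last_served_meatball_index := by
  intro N D ws hDom hPre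
  unfold Spec_last_served_meatball_index last_served_meatball_index last_served_meatball_index_alt
  set q0 : List (Int × Int) := (PySem.List.enumerate ws).map (fun p => (p.2, p.1 + 1)) with hq0
  have hmem : ∀ p ∈ q0, p.1 ∈ ws := by
    intro p hp
    rw [hq0, List.mem_map] at hp
    obtain ⟨a, ha, rfl⟩ := hp
    have : a.2 ∈ (PySem.List.enumerate ws 0).map (fun p => p.2) := List.mem_map_of_mem ha
    simpa [PySem.List.map_snd_enumerate] using this
  have hcond : 1 ≤ D ∨ ∀ p ∈ q0, p.1 ≤ D := by
    rcases hPre with h | h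
    · exact Or.inl (by omega)
    · exact Or.inr (fun p hp => h p.1 (hmem p hp))
  have hsumr : pvSumR D q0 = (ws.map (pvRounds D)).sum := by
    simp only [pvSumR, hq0, List.map_map]
    have : ((PySem.List.enumerate ws 0).map (fun p => p.2)).map (pvRounds D)
        = ws.map (pvRounds D) := by rw [PySem.List.map_snd_enumerate]
    rw [← this, List.map_map]
    rfl
  have hbound : ∀ l : List Int, (1 ≤ D ∨ ∀ w ∈ l, w ≤ D) →
      (l.map (pvRounds D)).sum ≤ ((l.length + (l.map (fun w => w.toNat)).sum : Nat) : Int) := by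
    intro l
    induction l with
    | nil => simp
    | cons a t ih =>
        intro h
        have ha := pvRounds_le (w := a) (h.imp id (fun hh => hh a (List.mem_cons_self)))
        have ht := ih (h.imp id (fun hh w hw => hh w (List.mem_cons_of_mem a hw)))
        simp only [List.map_cons, List.sum_cons, List.length_cons] at *
        push_cast at ht ⊢
        have hna : ((a.toNat : Int)) = max a 0 := Int.toNat_eq_max a
        omega
  have hPreL : 1 ≤ D ∨ ∀ w ∈ ws, w ≤ D := by
    rcases hPre with h | h
    · exact Or.inl (by omega)
    · exact Or.inr h
  have hfuel : pvSumR D q0 ≤ ((ws.length + (ws.map (fun w => w.toNat)).sum : Nat) : Int) := by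
    rw [hsumr]; exact hbound ws hPreL
  rw [pvMain D _ q0 (-1) hcond hfuel]
  -- bridge B's fold over enumerate(ws, 1) with the queue fold
  have henum : PySem.List.enumerate ws 1 = (PySem.List.enumerate ws 0).map (fun p => (p.1 + 1, p.2)) := by
    have := pvEnumShift ws 0
    simpa using this
  have hB : ((PySem.List.enumerate ws 1).foldl (pvBStep D) (0, -1)).2
      = (pvFoldQ D q0 (0, -1)).2 := by
    rw [henum, List.foldl_map, hq0]
    simp only [pvFoldQ, List.foldl_map]
    rfl
  rw [← hB]
  by_cases hnil : q0 = []
  · have hws : ws = [] := by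
      cases ws with
      | nil => rfl
      | cons a t => simp [hq0, PySem.List.enumerate_cons] at hnil
    subst hws
    simp [hq0, PySem.List.enumerate_nil]
  · rw [if_neg hnil]
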